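-- pv_equiv track=rewrite | github.com/PrzemyslawSwiderski/algorithms-playground | problems/beautiful-nums/script.py | others_increasing
-- ===== SOURCE A (Python) =====
-- def others_increasing(start_num, input_s):
--     current_num = start_num
--     prev_str = input_s
--     tmp_str = input_s.removeprefix(str(start_num))
--
--     while prev_str != tmp_str:
--         current_num = current_num + 1
--         prev_str = tmp_str
--         tmp_str = tmp_str.removeprefix(str(current_num))
--
--     if tmp_str == "":
--         return True
--     else:
--         return False
-- ===== SOURCE B (Python) =====
-- def others_increasing(start_num, input_s):
--     expected = ""
--     n = start_num
--     while len(expected) < len(input_s):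
--         expected += str(n)
--         n = n + 1
--     return expected == input_s
-- ===== Notes on version B (the rewrite author's own statement) =====
-- stated objective: simpler
-- what changed: B builds the expected concatenation str(start_num)+str(start_num+1)+... forward until it reaches the input's length and does one final equality check, instead of A's repeated prefix-consumption loop with a changed-string test and final emptiness check.
import Mathlib
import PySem

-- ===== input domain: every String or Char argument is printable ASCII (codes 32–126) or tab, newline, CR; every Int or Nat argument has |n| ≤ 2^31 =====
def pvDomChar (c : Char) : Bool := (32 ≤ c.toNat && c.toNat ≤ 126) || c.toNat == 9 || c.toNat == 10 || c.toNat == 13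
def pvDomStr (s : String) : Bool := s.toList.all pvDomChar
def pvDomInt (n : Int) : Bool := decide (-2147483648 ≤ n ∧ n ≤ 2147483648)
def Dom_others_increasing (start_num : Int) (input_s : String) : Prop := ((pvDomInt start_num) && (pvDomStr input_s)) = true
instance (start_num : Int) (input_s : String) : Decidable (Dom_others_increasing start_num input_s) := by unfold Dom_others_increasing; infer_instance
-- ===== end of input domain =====

-- B builds the expected concatenation str(start)+str(start+1)+… forward and compares once,
-- instead of A's repeated prefix-consumption; objective: simpler (same O(L) cost).

-- str(n) as a character list (shared primitive wrapper, used by both ports)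
def pvStr (n : Int) : List Char := PySem.Int.toChars n

-- str(n) is never empty (used for termination of both ports' loops)
theorem pvStr_length_pos (n : Int) : 0 < (pvStr n).length := by
  unfold pvStr PySem.Int.toChars
  split
  · simp
  · exact Nat.length_toDigits_pos

-- s.removeprefix(p): hand port, exact — drop p if p is a prefix, else s unchanged
def pvRemovePrefix (s p : List Char) : List Char :=
  if p.isPrefixOf s then s.drop p.length else s

-- ===== PORT A =====
-- Python's while-loop, rotated into the standard recursive form: the state is
-- (current_num, prev_str); each call computes tmp_str = prev_str.removeprefix(str(current_num)),
-- recurses while prev_str != tmp_str, and finally returns tmp_str == "".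
def pvLoopA (current : Int) (prev : List Char) : Bool :=
  let tmp := pvRemovePrefix prev (pvStr current)
  if prev ≠ tmp then pvLoopA (current + 1) tmp else decide (tmp = [])
termination_by prev.length
decreasing_by
  rename_i hne
  by_cases hpre : (pvStr current).isPrefixOf prev
  · have hle : (pvStr current).length ≤ prev.length :=
      ((List.isPrefixOf_iff_prefix).mp hpre).length_le
    have hpos := pvStr_length_pos current
    unfold pvRemovePrefix
    rw [if_pos hpre]
    simp only [List.length_drop]
    omega
  · exact absurd (if_neg hpre).symm hne

def others_increasing (start_num : Int) (input_s : String) : Bool :=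
  pvLoopA start_num input_s.toList

-- ===== PORT B =====
-- Source B's while-loop: grow `expected` by str(n) until it is at least as long as the input.
def pvBuild (target expected : List Char) (n : Int) : List Char :=
  if expected.length < target.length then pvBuild target (expected ++ pvStr n) (n + 1) else expected
termination_by target.length - expected.length
decreasing_by
  rename_i hlt
  have := pvStr_length_pos n
  simp only [List.length_append]
  omega

def others_increasing_alt (start_num : Int) (input_s : String) : Bool :=
  decide (pvBuild input_s.toList [] start_num = input_s.toList)

-- ===== PRECONDITION & SPEC =====
def Spec_others_increasing (start_num : Int) (input_s : String) (out : Bool) : Prop := out = others_increasing_alt start_num input_s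
instance (start_num : Int) (input_s : String) (out : Bool) : Decidable (Spec_others_increasing start_num input_s out) := by unfold Spec_others_increasing; infer_instance

-- ===== CLAIM (what is proved, stated in full; the proofs are below) =====
def Claim_equal_others_increasing : Prop := ∀ (start_num : Int) (input_s : String), Dom_others_increasing start_num input_s → Spec_others_increasing start_num input_s (others_increasing start_num input_s)

-- ===== LEMMAS AND PROOFS =====

-- Common normal form: the consecutive-number string grown to length ≥ m
def pvGrow (m : Nat) (n : Int) : List Char :=
  if 0 < m then pvStr n ++ pvGrow (m - (pvStr n).length) (n + 1) else []
termination_by m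
decreasing_by
  have := pvStr_length_pos n
  omega

-- B's accumulator loop is the accumulator prepended to pvGrow of the missing length
theorem pvBuild_eq_grow (t e : List Char) (n : Int) :
    pvBuild t e n = e ++ pvGrow (t.length - e.length) n := by
  rw [pvBuild, pvGrow]
  by_cases h : e.length < t.length
  · rw [if_pos h, if_pos (by omega), pvBuild_eq_grow t (e ++ pvStr n) (n + 1)]
    simp only [List.length_append, List.append_assoc]
    rw [Nat.sub_add_eq]
  · rw [if_neg h, if_neg (by omega), List.append_nil]
termination_by t.length - e.length
decreasing_by
  have := pvStr_length_pos n
  simp only [List.length_append]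
  omega

-- A's prefix-consumption loop answers exactly whether prev equals the grown string
theorem pvLoopA_eq_grow (current : Int) (prev : List Char) :
    pvLoopA current prev = decide (pvGrow prev.length current = prev) := by
  rw [pvLoopA, pvGrow]
  by_cases hpre : (pvStr current).isPrefixOf prev
  · obtain ⟨tail, htail⟩ := (List.isPrefixOf_iff_prefix).mp hpre
    have hpos := pvStr_length_pos current
    have hlen : 0 < prev.length := by
      rw [← htail]; simp only [List.length_append]; omega
    have htmp : pvRemovePrefix prev (pvStr current) = tail := by
      unfold pvRemovePrefix
      rw [if_pos hpre, ← htail, List.drop_left]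
    have hne : prev ≠ pvRemovePrefix prev (pvStr current) := by
      rw [htmp, ← htail]
      intro hcontra
      have := congrArg List.length hcontra
      simp only [List.length_append] at this
      omega
    simp only [htmp, if_pos hlen]
    rw [if_pos (by rw [htmp] at hne; exact hne)]
    have hsub : prev.length - (pvStr current).length = tail.length := by
      rw [← htail]; simp only [List.length_append]; omega
    have IH := pvLoopA_eq_grow (current + 1) tail
    rw [IH, hsub, ← htail]
    simp only [List.append_cancel_left_eq]
  · have htmp : pvRemovePrefix prev (pvStr current) = prev := by
      unfold pvRemovePrefix; rw [if_neg hpre]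
    simp only [htmp, ne_eq, not_true_eq_false, if_false]
    by_cases hnil : prev = []
    · subst hnil; simp
    · have hlen : 0 < prev.length := List.length_pos_iff.mpr hnil
      rw [if_pos hlen]
      have : pvStr current ++ pvGrow (prev.length - (pvStr current).length) (current + 1) ≠ prev := by
        intro hcontra
        exact hpre ((List.isPrefixOf_iff_prefix).mpr ⟨_, hcontra⟩)
      simp [hnil, this]
termination_by prev.length
decreasing_by
  have h2 : tail.length + (pvStr current).length = prev.length := by
    rw [← htail]; simp only [List.length_append]; omega
  have := pvStr_length_pos current
  omega

-- ===== VERDICT (by name: the statement is the Claim_ definition above) =====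
theorem others_increasing_spec : Claim_equal_others_increasing := by
  intro start_num input_s _
  unfold Spec_others_increasing others_increasing others_increasing_alt
  rw [pvLoopA_eq_grow, pvBuild_eq_grow]
  simp
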